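-- pv_equiv track=rewrite | github.com/masahiro-kubota/alpasim | src/runtime/alpasim_runtime/worker/allocation.py | compute_instance_allocation
-- ===== SOURCE A (Python) =====
-- def compute_instance_allocation(
--     addresses: list[str],
--     n_concurrent: int,
--     worker_id: int,
--     num_workers: int,
-- ) -> dict[str, int]:
--     """
--     Distribute total instances (addresses × n_concurrent) across workers.
--     Returns a dict mapping address -> concurrency for this worker.
--
--     Instances are assigned contiguously, so workers tend to get
--     consecutive addresses (good for cache locality).
--
--     Args:
--         addresses: List of service addresses
--         n_concurrent: Number of concurrent slots per address
--         worker_id: This worker's ID (0-indexed)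
--         num_workers: Total number of workers
--
--     Returns:
--         Dict mapping address -> number of concurrent slots for this worker.
--         Empty dict if worker has no allocation for this service.
--     """
--     total_instances = len(addresses) * n_concurrent
--
--     if total_instances == 0 or num_workers == 0:
--         return {}
--
--     # Balanced distribution: some workers get ceil, others get floor
--     base = total_instances // num_workers
--     remainder = total_instances % num_workers
--
--     # If total_instances / num_workers is not an integer, we distribute
--     # the remainder evenly across the first `remainder` workers, i.e.
--     # The workers 0, ..., remainder - 1 get `(base + 1)` instances and
--     # The workers remainder, ..., num_workers - 1 get `base` instances
--     if worker_id < remainder: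
--         start = worker_id * (base + 1)
--         count = base + 1
--     else:
--         start = remainder * (base + 1) + (worker_id - remainder) * base
--         count = base
--
--     if count == 0:
--         return {}
--
--     end = start + count
--
--     # Map instance range [start, end) to {address: concurrency}
--     # Example: 2 addresses, n_concurrent=4
--     # 3 Workers, 3 + 3 + 2 = 8 instances
--     # Worker 2 gets instances [3, 6)
--     #   Address 0: instances [0, 4) → overlap [3, 4) → 1 slot
--     #   Address 1: instances [4, 8) → overlap [4, 6) → 2 slots
--     #   Result: {addr0: 1, addr1: 2}
--     # Worker 0 gets instances [7, 8]
--     allocation: dict[str, int] = {}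
--     for addr_idx, addr in enumerate(addresses):
--         addr_start = addr_idx * n_concurrent
--         addr_end = addr_start + n_concurrent
--
--         # Intersection of [start, end) with [addr_start, addr_end)
--         overlap_start = max(start, addr_start)
--         overlap_end = min(end, addr_end)
--
--         if overlap_start < overlap_end:
--             allocation[addr] = overlap_end - overlap_start
--
--     return allocation
-- ===== SOURCE B (Python) =====
-- def compute_instance_allocation(
--     addresses: list[str],
--     n_concurrent: int,
--     worker_id: int,
--     num_workers: int,
-- ) -> dict[str, int]:
--     """Same allocation, but touching only the addresses that overlap
--     this worker's instance range instead of scanning all of them."""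
--     if n_concurrent <= 0 or not addresses or num_workers == 0:
--         return {}
--
--     total = len(addresses) * n_concurrent
--     base = total // num_workers
--     rem = total % num_workers
--     if worker_id < rem:
--         start = worker_id * (base + 1)
--         count = base + 1
--     else:
--         start = rem * (base + 1) + (worker_id - rem) * base
--         count = base
--     if count <= 0:
--         return {}
--     end = start + count
--
--     lo = max(start // n_concurrent, 0)
--     hi = min((end - 1) // n_concurrent, len(addresses) - 1)
--     if hi < lo:
--         return {}
--
--     out: dict[str, int] = {}
--     for i, addr in enumerate(addresses[lo:hi + 1], lo):
--         out[addr] = min(end, (i + 1) * n_concurrent) - max(start, i * n_concurrent)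
--     return out
-- ===== Notes on version B (the rewrite author's own statement) =====
-- stated objective: faster
-- what changed: Instead of scanning every address and intersecting its instance interval with the worker's range, B computes the index range of overlapping addresses directly via start//n_concurrent..(end-1)//n_concurrent and iterates only that slice.
import Mathlib
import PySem

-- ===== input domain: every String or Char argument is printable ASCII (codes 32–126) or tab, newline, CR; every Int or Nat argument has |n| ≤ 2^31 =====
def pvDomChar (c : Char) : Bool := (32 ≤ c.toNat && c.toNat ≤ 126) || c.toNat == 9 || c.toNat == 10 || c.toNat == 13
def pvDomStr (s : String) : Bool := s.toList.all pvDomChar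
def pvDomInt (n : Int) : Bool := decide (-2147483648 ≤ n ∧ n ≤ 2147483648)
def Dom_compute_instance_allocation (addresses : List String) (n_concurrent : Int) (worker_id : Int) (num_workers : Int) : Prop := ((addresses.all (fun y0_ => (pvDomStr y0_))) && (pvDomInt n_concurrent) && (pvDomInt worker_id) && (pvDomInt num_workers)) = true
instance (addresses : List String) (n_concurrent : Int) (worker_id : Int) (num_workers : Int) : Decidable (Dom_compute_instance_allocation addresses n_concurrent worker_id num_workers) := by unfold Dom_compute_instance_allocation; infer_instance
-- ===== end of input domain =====

-- B replaces A's scan over ALL addresses by iterating only the slice of addresses whose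
-- instance intervals overlap the worker's range (index range start//n .. (end-1)//n); return values proved equal.

-- ===== PORT A =====
-- body of A's for-loop over enumerate(addresses) (kept as a named helper for the fold)
def allocStep (n_concurrent start endI : Int) (alloc : PySem.Dict String Int) (p : Int × String) : PySem.Dict String Int :=
  let addr_start := p.1 * n_concurrent
  let addr_end := addr_start + n_concurrent
  let overlap_start := max start addr_start
  let overlap_end := min endI addr_end
  if overlap_start < overlap_end then alloc.insert p.2 (overlap_end - overlap_start) else alloc

def compute_instance_allocation (addresses : List String) (n_concurrent : Int) (worker_id : Int) (num_workers : Int) : List (String × Int) :=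
  let total_instances : Int := (addresses.length : Int) * n_concurrent
  if total_instances = 0 ∨ num_workers = 0 then []
  else
    let base := PySem.Int.floordiv total_instances num_workers
    let remainder := PySem.Int.mod total_instances num_workers
    let start := if worker_id < remainder then worker_id * (base + 1)
                 else remainder * (base + 1) + (worker_id - remainder) * base
    let count := if worker_id < remainder then base + 1 else base
    if count = 0 then []
    else
      let endI := start + count
      ((PySem.List.enumerate addresses).foldl (allocStep n_concurrent start endI) PySem.Dict.empty).items

-- ===== PORT B =====
-- B's for-loop: every address of the slice gets an entry; i is the running absolute index
def allocRangeLoop (n_concurrent start endI : Int) : List String → Int → PySem.Dict String Int → PySem.Dict String Int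
  | [], _, out => out
  | addr :: rest, i, out =>
      allocRangeLoop n_concurrent start endI rest (i + 1)
        (out.insert addr (min endI ((i + 1) * n_concurrent) - max start (i * n_concurrent)))

def compute_instance_allocation_alt (addresses : List String) (n_concurrent : Int) (worker_id : Int) (num_workers : Int) : List (String × Int) :=
  if n_concurrent ≤ 0 ∨ addresses = [] ∨ num_workers = 0 then []
  else
    let total : Int := (addresses.length : Int) * n_concurrent
    let base := PySem.Int.floordiv total num_workers
    let rem := PySem.Int.mod total num_workers
    let start := if worker_id < rem then worker_id * (base + 1)
                 else rem * (base + 1) + (worker_id - rem) * base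
    let count := if worker_id < rem then base + 1 else base
    if count ≤ 0 then []
    else
      let endI := start + count
      let lo := max (PySem.Int.floordiv start n_concurrent) 0
      let hi := min (PySem.Int.floordiv (endI - 1) n_concurrent) ((addresses.length : Int) - 1)
      if hi < lo then []
      else
        (allocRangeLoop n_concurrent start endI
          (PySem.List.slice addresses (some lo) (some (hi + 1))) lo PySem.Dict.empty).items

-- ===== PRECONDITION & SPEC =====
def Spec_compute_instance_allocation (addresses : List String) (n_concurrent : Int) (worker_id : Int) (num_workers : Int) (out : List (String × Int)) : Prop := out = compute_instance_allocation_alt addresses n_concurrent worker_id num_workers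
instance (addresses : List String) (n_concurrent : Int) (worker_id : Int) (num_workers : Int) (out : List (String × Int)) : Decidable (Spec_compute_instance_allocation addresses n_concurrent worker_id num_workers out) := by unfold Spec_compute_instance_allocation; infer_instance

-- ===== CLAIM (what is proved, stated in full; the proofs are below) =====
def Claim_equal_compute_instance_allocation : Prop := ∀ (addresses : List String) (n_concurrent : Int) (worker_id : Int) (num_workers : Int), Dom_compute_instance_allocation addresses n_concurrent worker_id num_workers → Spec_compute_instance_allocation addresses n_concurrent worker_id num_workers (compute_instance_allocation addresses n_concurrent worker_id num_workers)

-- ===== LEMMAS AND PROOFS =====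

theorem enumerate_append_str (l1 l2 : List String) (k : Int) :
    PySem.List.enumerate (l1 ++ l2) k
      = PySem.List.enumerate l1 k ++ PySem.List.enumerate l2 (k + l1.length) := by
  induction l1 generalizing k with
  | nil => simp [PySem.List.enumerate_nil]
  | cons a t ih =>
      have h : k + 1 + (t.length : Int) = k + ((a :: t).length : Int) := by
        push_cast [List.length_cons]; ring
      rw [List.cons_append, PySem.List.enumerate_cons, PySem.List.enumerate_cons, ih, h,
        List.cons_append]

-- A's loop does nothing on a block of indices none of which overlaps [start, endI)
theorem foldl_allocStep_noop (n s e : Int) (l : List String) (k : Int) (d : PySem.Dict String Int)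
    (h : ∀ i : Int, k ≤ i → i < k + l.length → ¬ (max s (i * n) < min e (i * n + n))) :
    (PySem.List.enumerate l k).foldl (allocStep n s e) d = d := by
  induction l generalizing k d with
  | nil => simp [PySem.List.enumerate_nil]
  | cons a t ih =>
      rw [PySem.List.enumerate_cons, List.foldl_cons]
      have hk : ¬ (max s (k * n) < min e (k * n + n)) :=
        h k le_rfl (by push_cast [List.length_cons]; omega)
      have hstep : allocStep n s e d (k, a) = d := by
        simp only [allocStep]; rw [if_neg hk]
      rw [hstep]
      exact ih (k + 1) d
        (fun i h1 h2 => h i (by omega) (by push_cast [List.length_cons] at h2 ⊢; omega))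

-- on a block of indices all of which overlap, A's loop is exactly B's loop
theorem foldl_allocStep_mid (n s e : Int) (l : List String) (k : Int) (d : PySem.Dict String Int)
    (h : ∀ i : Int, k ≤ i → i < k + l.length → (max s (i * n) < min e (i * n + n))) :
    (PySem.List.enumerate l k).foldl (allocStep n s e) d = allocRangeLoop n s e l k d := by
  induction l generalizing k d with
  | nil => simp [PySem.List.enumerate_nil, allocRangeLoop]
  | cons a t ih =>
      rw [PySem.List.enumerate_cons, List.foldl_cons]
      have hk : max s (k * n) < min e (k * n + n) :=
        h k le_rfl (by push_cast [List.length_cons]; omega)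
      have hstep : allocStep n s e d (k, a)
          = d.insert a (min e ((k + 1) * n) - max s (k * n)) := by
        simp only [allocStep]; rw [if_pos hk]; ring_nf
      rw [hstep, allocRangeLoop]
      exact ih (k + 1) _
        (fun i h1 h2 => h i (by omega) (by push_cast [List.length_cons] at h2 ⊢; omega))

-- index i's address interval [i*n, i*n+n) meets [s, e) iff s//n ≤ i ≤ (e-1)//n
theorem overlap_iff (n s e i : Int) (hn : 0 < n) (hse : s < e) :
    (max s (i * n) < min e (i * n + n))
      ↔ (PySem.Int.floordiv s n ≤ i ∧ i ≤ PySem.Int.floordiv (e - 1) n) := by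
  have h1 : PySem.Int.floordiv s n ≤ i ↔ s < (i + 1) * n := by
    constructor
    · intro h
      exact (PySem.Int.floordiv_lt_iff_lt_mul hn (q := i + 1)).mp (by omega)
    · intro h
      by_contra hc
      push_neg at hc
      have := (PySem.Int.le_floordiv_iff_mul_le hn (q := i + 1) (a := s)).mp (by omega)
      omega
  have h2 : i ≤ PySem.Int.floordiv (e - 1) n ↔ i * n ≤ e - 1 :=
    PySem.Int.le_floordiv_iff_mul_le hn
  have e1 : (i + 1) * n = i * n + n := by ring
  rw [h1, h2, lt_min_iff, max_lt_iff, max_lt_iff]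
  constructor
  · rintro ⟨⟨_, hsn⟩, ⟨hin, _⟩⟩
    constructor <;> linarith
  · rintro ⟨ha, hb⟩
    refine ⟨⟨hse, by linarith⟩, ⟨by linarith, by linarith⟩⟩

-- the heart of the equivalence: A's full scan equals B's guarded scan of the overlap slice
theorem core_eq (l : List String) (n st cnt : Int) (hn : 0 < n) :
    (if cnt = 0 then []
     else ((PySem.List.enumerate l).foldl (allocStep n st (st + cnt)) PySem.Dict.empty).items)
    = (if cnt ≤ 0 then []
       else
         if min (PySem.Int.floordiv (st + cnt - 1) n) ((l.length : Int) - 1)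
              < max (PySem.Int.floordiv st n) 0 then []
         else
           (allocRangeLoop n st (st + cnt)
              (PySem.List.slice l (some (max (PySem.Int.floordiv st n) 0))
                (some (min (PySem.Int.floordiv (st + cnt - 1) n) ((l.length : Int) - 1) + 1)))
              (max (PySem.Int.floordiv st n) 0) PySem.Dict.empty).items) := by
  rcases lt_trichotomy cnt 0 with hc | hc | hc
  · -- cnt < 0: A's loop never overlaps (endI < start), both sides empty
    rw [if_neg (by omega), if_pos (by omega)]
    rw [foldl_allocStep_noop n st (st + cnt) l 0 PySem.Dict.empty]
    · rfl
    · intro i _ _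
      have h1 : min (st + cnt) (i * n + n) ≤ st + cnt := min_le_left _ _
      have h2 : st ≤ max st (i * n) := le_max_left _ _
      omega
  · simp [hc]
  · -- cnt > 0
    rw [if_neg (by omega), if_neg (by omega)]
    set lod := PySem.Int.floordiv st n with hlod
    set hid := PySem.Int.floordiv (st + cnt - 1) n with hhid
    set lo := max lod 0 with hlo
    set hi := min hid ((l.length : Int) - 1) with hhi
    have hse : st < st + cnt := by omega
    have hlo0 : (0 : Int) ≤ lo := le_max_right _ _
    have hlod_le : lod ≤ lo := le_max_left _ _
    have hhi_le : hi ≤ (l.length : Int) - 1 := min_le_right _ _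
    have hhi_hid : hi ≤ hid := min_le_left _ _
    by_cases hcase : hi < lo
    · rw [if_pos hcase]
      rw [foldl_allocStep_noop n st (st + cnt) l 0 PySem.Dict.empty]
      · rfl
      · intro i h0 hlen hov
        rw [overlap_iff n st (st + cnt) i hn hse] at hov
        obtain ⟨o1, o2⟩ := hov
        have hi1 : lo ≤ i := max_le o1 h0
        have hi2 : i ≤ hi := le_min o2 (by omega)
        omega
    · push_neg at hcase
      rw [if_neg (by omega)]
      -- set up the three-way decomposition of addresses at indices lo and hi+1
      set L : Nat := lo.toNat with hLdef
      set H : Nat := (hi + 1).toNat with hHdef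
      have hL : (L : Int) = lo := Int.toNat_of_nonneg hlo0
      have hH : (H : Int) = hi + 1 := Int.toNat_of_nonneg (by omega)
      have hLH : L ≤ H := by omega
      have hHlen : H ≤ l.length := by
        have : (H : Int) ≤ (l.length : Int) := by omega
        exact_mod_cast this
      have hslice : PySem.List.slice l (some lo) (some (hi + 1))
          = (l.drop L).take (H - L) := by
        rw [← hL, ← hH]
        rw [PySem.List.slice_toNat l (by omega) (by omega)]
        simp
      set mid : List String := (l.drop L).take (H - L) with hmid
      have hmid_len : mid.length = H - L := by
        rw [hmid, List.length_take, List.length_drop]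
        omega
      have htake_len : (l.take L).length = L := by
        rw [List.length_take]
        omega
      have hdrop_eq : l.drop L = mid ++ l.drop H := by
        have h1 := List.take_append_drop (H - L) (l.drop L)
        rw [List.drop_drop] at h1
        have h2 : L + (H - L) = H := by omega
        rw [h2] at h1
        exact h1.symm
      have hdec : l = l.take L ++ (mid ++ l.drop H) := by
        conv_lhs => rw [← List.take_append_drop L l, hdrop_eq]
      -- split A's enumeration accordingly
      conv_lhs => rw [hdec]
      rw [enumerate_append_str, enumerate_append_str, List.foldl_append, List.foldl_append]
      -- prefix: indices [0, lo) never overlap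
      have hpre : (PySem.List.enumerate (l.take L) 0).foldl (allocStep n st (st + cnt))
          PySem.Dict.empty = PySem.Dict.empty := by
        apply foldl_allocStep_noop
        intro i h0 hlen hov
        rw [overlap_iff n st (st + cnt) i hn hse] at hov
        have : lo ≤ i := max_le hov.1 h0
        rw [htake_len] at hlen
        omega
      -- middle: indices [lo, hi+1) all overlap, giving exactly B's loop
      have hmidk : (0 : Int) + (l.take L).length = lo := by
        rw [htake_len]; omega
      have hmid_fold : (PySem.List.enumerate mid ((0 : Int) + (l.take L).length)).foldl
            (allocStep n st (st + cnt)) PySem.Dict.empty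
          = allocRangeLoop n st (st + cnt) mid lo PySem.Dict.empty := by
        rw [hmidk]
        apply foldl_allocStep_mid
        intro i h1 h2
        rw [overlap_iff n st (st + cnt) i hn hse]
        rw [hmid_len] at h2
        have hcast : ((H - L : Nat) : Int) = hi + 1 - lo := by
          push_cast [Nat.cast_sub hLH] at *
          omega
        rw [hcast] at h2
        exact ⟨by omega, by omega⟩
      -- suffix: indices [hi+1, len) never overlap
      have hsufk : (0 : Int) + (l.take L).length + mid.length = hi + 1 := by
        rw [htake_len, hmid_len]
        push_cast [Nat.cast_sub hLH]
        omega
      have hsuf : ∀ d : PySem.Dict String Int,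
          (PySem.List.enumerate (l.drop H) ((0 : Int) + (l.take L).length + mid.length)).foldl
            (allocStep n st (st + cnt)) d = d := by
        intro d
        rw [hsufk]
        apply foldl_allocStep_noop
        intro i h1 h2 hov
        rw [overlap_iff n st (st + cnt) i hn hse] at hov
        rw [List.length_drop] at h2
        have hcast : ((l.length - H : Nat) : Int) = (l.length : Int) - (hi + 1) := by
          push_cast [Nat.cast_sub hHlen]
          omega
        rw [hcast] at h2
        have : i ≤ hi := le_min hov.2 (by omega)
        omega
      rw [hpre, hmid_fold, hsuf, hslice]

theorem alloc_eq (addresses : List String) (n_concurrent : Int) (worker_id : Int)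
    (num_workers : Int) :
    compute_instance_allocation addresses n_concurrent worker_id num_workers
      = compute_instance_allocation_alt addresses n_concurrent worker_id num_workers := by
  by_cases hnw : num_workers = 0
  · simp [compute_instance_allocation, compute_instance_allocation_alt, hnw]
  · by_cases ha : addresses = []
    · simp [compute_instance_allocation, compute_instance_allocation_alt, ha, hnw]
    · by_cases hn : n_concurrent ≤ 0
      · -- A's guard may not fire, but no address interval [i*n, i*n+n) is nonempty: A's loop is a no-op
        simp only [compute_instance_allocation, compute_instance_allocation_alt]
        rw [if_pos (Or.inl hn)]
        have hno : ∀ s e : Int,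
            ((PySem.List.enumerate addresses).foldl (allocStep n_concurrent s e)
              PySem.Dict.empty).items = [] := by
          intro s e
          rw [foldl_allocStep_noop]
          · rfl
          · intro i _ _
            rw [lt_min_iff, max_lt_iff, max_lt_iff]
            rintro ⟨⟨_, _⟩, _, h4⟩
            omega
        split_ifs <;> first | rfl | exact hno _ _
      · push_neg at hn
        have hlen : addresses.length ≠ 0 := fun h => ha (List.eq_nil_of_length_eq_zero h)
        have htot : ((addresses.length : Int) * n_concurrent) ≠ 0 := by
          have h1 : (0 : Int) < (addresses.length : Int) := by
            exact_mod_cast Nat.pos_of_ne_zero hlen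
          exact mul_ne_zero (by omega) (by omega)
        have hBg : ¬(n_concurrent ≤ 0 ∨ addresses = [] ∨ num_workers = 0) := by
          push_neg
          exact ⟨by omega, ha, hnw⟩
        have hAg : ¬((addresses.length : Int) * n_concurrent = 0 ∨ num_workers = 0) := by
          push_neg
          exact ⟨htot, hnw⟩
        simp only [compute_instance_allocation, compute_instance_allocation_alt]
        rw [if_neg hBg, if_neg hAg]
        exact core_eq addresses n_concurrent _ _ hn

-- ===== VERDICT (by name: the statement is the Claim_ definition above) =====
theorem compute_instance_allocation_spec : Claim_equal_compute_instance_allocation := by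
  intro addresses n_concurrent worker_id num_workers _
  exact alloc_eq addresses n_concurrent worker_id num_workers
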